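-- pv_equiv track=rewrite | github.com/Moshibit/UAML-CR-20P | redes.py | dist_grados_de_salida
-- ===== SOURCE A (Python) =====
-- def calcula_grados_de_salida(d_grafica):
--     """
--     Recibe un diccionario que representa una gráfica dirigida y regresa un
--     diccionario donde sus llaves son los nodos de la gráfica y los valores son
--     el grado de salida de ese nodo.
--
--     Parámetros
--     ----------
--     d_grafica : Diccionario
--         DESCRIPCIÓN. Gráfica dirigida, las claves representan los nodos y los
--         valores son conjunto de los nodos a los que se conectan.
--
--     Excepción
--     ---------
--     TypeError
--         Se lanza cuando no recibe un diccionario como parámetro.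
--
--     Retorno
--     -------
--     deg_out : Diccionario
--         Las llaves de este diccionario son nodos y sus valores
--         son entero que indican el grado de salida de los nodos.
--
--     """
--
--     # validación del parámetro de entrada
--     if not isinstance(d_grafica, dict):
--         raise TypeError("el parámetro que recibe " +
--                         "calcula_grados_de_salida() tiene que ser un " +
--                         "diccionario.")
--
--     # el valor de retorno es un diccionario vacío donde se gurdaran los datos
--     deg_out = dict()
--
--     # contrución de la tabla
--     for nodo, ady in d_grafica.items():
--
--         # verificacada a cuantos nodos se enlaza al nodo que recorre
--         # actualmente
--         deg_out[nodo] = len(ady)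
--
--     return deg_out
--
-- def dist_grados_de_salida(d_grafica):
--     """
--     Recibe un diccionario que representa una gráfica dirigida y regresa un
--     diccionario donde sus llaves son los grados de salida de la gráfica y los
--     valores son la frecuencia de los grados de salida.
--
--     Parámetros
--     ----------
--     d_grafica : Diccionario
--         Gráfica dirigida, las claves representan los nodos y los valores
--         son conjunto de los nodos a los que se conectan.
--
--     Excepción
--     ---------
--     TypeError
--         Se lanza cuando no recibe un diccionario como parámetro.
--
--     Retorno
--     -------
--     distr : Diccionario
--         Las llaves de este diccionario son grados de salida y sus valores son
--         entero que indican la frecuencia de los grados de salida.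
--
--     """
--
--     # validación del parámetro de entrada
--     if not isinstance(d_grafica, dict):
--         raise TypeError("el parámetro que recibe dist_grados_de_salida() " +
--                         "tiene que ser un diccionario.")
--
--     # obtiene la lista de los grados de entrada
--     deg_out = list(calcula_grados_de_salida(d_grafica).values())
--
--     # umbral de grados a buscar en la lista
--     deg_max = max(deg_out)
--
--     # el valor de retorno es un diccionario vacío donde se gurdaran los datos
--     distr = dict()
--
--     # recorre la lista para crear una tabla de distribución
--     for grado in range(deg_max + 1):
--
--         # cuenta cuantos veces se encuentra el grado actual en la lista
--         deg_count = deg_out.count(grado)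
--         distr[grado] = deg_count
--
--     return distr
-- ===== SOURCE B (Python) =====
-- def dist_grados_de_salida(d_grafica):
--     if not isinstance(d_grafica, dict):
--         raise TypeError("el parámetro que recibe dist_grados_de_salida() " +
--                         "tiene que ser un diccionario.")
--
--     # grados de salida
--     degs = [len(ady) for ady in d_grafica.values()]
--
--     # arreglo-histograma indexado por grado; max([]) lanza el mismo
--     # ValueError que A en la gráfica vacía
--     hist = [0] * (max(degs) + 1)
--     for deg in degs:
--         hist[deg] += 1
--
--     # el índice del arreglo ES el grado
--     return dict(enumerate(hist))
-- ===== Notes on version B (the rewrite author's own statement) =====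
-- stated objective: alternative
-- what changed: Replaces A's dict built by scanning the degree list once per grade (list.count inside a range loop) with a counting array indexed by degree filled in one pass and turned into the result via dict(enumerate(hist)); no per-grade scan and no explicit range loop remain.
import Mathlib
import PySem

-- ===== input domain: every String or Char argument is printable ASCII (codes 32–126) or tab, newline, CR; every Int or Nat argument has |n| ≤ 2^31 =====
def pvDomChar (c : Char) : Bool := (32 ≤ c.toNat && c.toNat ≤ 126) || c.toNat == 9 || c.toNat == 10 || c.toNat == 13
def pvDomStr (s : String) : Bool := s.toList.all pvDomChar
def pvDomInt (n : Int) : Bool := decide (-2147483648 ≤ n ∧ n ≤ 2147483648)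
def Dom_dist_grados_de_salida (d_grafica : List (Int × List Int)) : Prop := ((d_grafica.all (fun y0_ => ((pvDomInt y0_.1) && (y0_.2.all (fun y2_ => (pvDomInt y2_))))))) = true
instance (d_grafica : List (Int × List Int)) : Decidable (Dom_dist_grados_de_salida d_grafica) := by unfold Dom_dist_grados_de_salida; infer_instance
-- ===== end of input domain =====

-- B replaces A's per-grade list.count scans over range(deg_max+1) by a counting array
-- indexed by degree, returned as dict(enumerate(hist)); equivalence proved on nonempty graphs.

-- ===== PORT A =====
def calcula_grados_de_salida (d_grafica : List (Int × List Int)) : PySem.Dict Int Int :=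
  d_grafica.foldl (fun deg_out p => deg_out.insert p.1 (p.2.length : Int)) PySem.Dict.empty

def dist_grados_de_salida (d_grafica : List (Int × List Int)) : List (Int × Int) :=
  let deg_out := (calcula_grados_de_salida d_grafica).values
  match PySem.List.max? deg_out (fun x => x) with
  | none => []   -- Python's max([]) raises ValueError here; excluded by Pre_
  | some deg_max =>
      ((PySem.List.pyRange 0 (deg_max + 1) 1).foldl
        (fun distr grado => distr.insert grado ((PySem.List.count deg_out grado : Int)))
        PySem.Dict.empty).items

-- ===== PORT B =====
def dist_grados_de_salida_alt (d_grafica : List (Int × List Int)) : List (Int × Int) :=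
  let degs := ((d_grafica.foldl (fun m p => m.insert p.1 p.2) PySem.Dict.empty).values).map
      (fun ady => (ady.length : Int))
  match PySem.List.max? degs (fun x => x) with
  | none => []   -- Python's max([]) raises ValueError here; excluded by Pre_
  | some deg_max =>
      let hist0 := PySem.List.pyRepeat [(0 : Int)] (deg_max + 1)   -- [0] * (max(degs) + 1)
      let hist := degs.foldl
        (fun h deg => PySem.List.pySetD h deg (PySem.List.pyGetD h deg 0 + 1)) hist0
      (PySem.Dict.ofList (PySem.List.enumerate hist)).items

-- ===== PRECONDITION & SPEC =====
-- On the empty graph both Pythons raise ValueError (max of an empty sequence), so it lies outside Pre_.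
def Pre_dist_grados_de_salida (d_grafica : List (Int × List Int)) : Prop := d_grafica ≠ []
instance (d_grafica : List (Int × List Int)) : Decidable (Pre_dist_grados_de_salida d_grafica) := by unfold Pre_dist_grados_de_salida; infer_instance
def pvWitness_dist_grados_de_salida : (List (Int × List Int)) := [(0, [1, 2]), (1, [])]

def Spec_dist_grados_de_salida (d_grafica : List (Int × List Int)) (out : List (Int × Int)) : Prop := out = dist_grados_de_salida_alt d_grafica
instance (d_grafica : List (Int × List Int)) (out : List (Int × Int)) : Decidable (Spec_dist_grados_de_salida d_grafica out) := by unfold Spec_dist_grados_de_salida; infer_instance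

-- ===== CLAIM (what is proved, stated in full; the proofs are below) =====
def Claim_equal_dist_grados_de_salida : Prop := ∀ (d_grafica : List (Int × List Int)), Dom_dist_grados_de_salida d_grafica → Pre_dist_grados_de_salida d_grafica → Spec_dist_grados_de_salida d_grafica (dist_grados_de_salida d_grafica)

-- ===== LEMMAS AND PROOFS =====

-- map a function over the values of a dict, keeping keys and order
def pvMapV (f : List Int → Int) (d : PySem.Dict Int (List Int)) : PySem.Dict Int Int :=
  PySem.Dict.mk (d.items.map (fun p => (p.1, f p.2)))

theorem pvMapV_contains (f : List Int → Int) (d : PySem.Dict Int (List Int)) (k : Int) :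
    (pvMapV f d).contains k = d.contains k := by
  simp [pvMapV, PySem.Dict.contains, List.any_map, Function.comp_def]

theorem pvMapV_insert (f : List Int → Int) (d : PySem.Dict Int (List Int)) (k : Int) (v : List Int) :
    (pvMapV f d).insert k (f v) = pvMapV f (d.insert k v) := by
  simp only [PySem.Dict.insert, pvMapV_contains]
  split
  · simp only [pvMapV, List.map_map]
    congr 1
    apply List.map_congr_left
    intro p _
    by_cases h : p.1 = k <;> simp [h]
  · simp [pvMapV]

theorem pvFoldl_mapV (l : List (Int × List Int)) (acc : PySem.Dict Int (List Int)) :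
    l.foldl (fun m p => m.insert p.1 ((p.2.length : Int))) (pvMapV (fun a => (a.length : Int)) acc)
      = pvMapV (fun a => (a.length : Int)) (l.foldl (fun m p => m.insert p.1 p.2) acc) := by
  induction l generalizing acc with
  | nil => rfl
  | cons p t ih =>
      simp only [List.foldl_cons, pvMapV_insert, ih]

theorem pvDegs_eq (d : List (Int × List Int)) :
    (calcula_grados_de_salida d).values
      = ((d.foldl (fun m p => m.insert p.1 p.2) PySem.Dict.empty).values).map
          (fun ady => (ady.length : Int)) := by
  have h0 : (PySem.Dict.empty : PySem.Dict Int Int)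
      = pvMapV (fun a => (a.length : Int)) PySem.Dict.empty := rfl
  unfold calcula_grados_de_salida
  rw [h0, pvFoldl_mapV]
  simp [pvMapV, PySem.Dict.values, List.map_map, Function.comp]

theorem pvGetD_replicate (n : Nat) (j : Int) (hj : 0 ≤ j) :
    PySem.List.pyGetD (List.replicate n (0 : Int)) j 0 = 0 := by
  rw [PySem.List.pyGetD_of_nonneg _ _ hj]
  rcases Nat.lt_or_ge j.toNat n with hlt | hge
  · simp [List.getD, hlt]
  · simp [List.getD, Nat.not_lt.mpr hge]

theorem pvHist_length (l : List Int) (h : List Int) :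
    (l.foldl (fun h deg => PySem.List.pySetD h deg (PySem.List.pyGetD h deg 0 + 1)) h).length
      = h.length := by
  induction l generalizing h with
  | nil => rfl
  | cons d t ih => simp [List.foldl_cons, ih, PySem.List.length_pySetD]

theorem pvGetD_setD (h : List Int) (deg j v : Int) (h0 : 0 ≤ deg)
    (hl : deg.toNat < h.length) (hj : 0 ≤ j) :
    PySem.List.pyGetD (PySem.List.pySetD h deg v) j 0
      = if j = deg then v else PySem.List.pyGetD h j 0 := by
  have hdeg : deg = ((deg.toNat : Nat) : Int) := (Int.toNat_of_nonneg h0).symm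
  have hjn : j = ((j.toNat : Nat) : Int) := (Int.toNat_of_nonneg hj).symm
  rw [hdeg, hjn, PySem.List.pyGetD_pySetD_natCast _ _ _ _ _ hl]
  split_ifs with h1 h2 h2 <;> first | rfl | (exfalso; omega)

theorem pvHist_getD (l : List Int) (h : List Int)
    (hb : ∀ x ∈ l, 0 ≤ x ∧ x.toNat < h.length) (j : Int) (hj : 0 ≤ j) :
    PySem.List.pyGetD
        (l.foldl (fun h deg => PySem.List.pySetD h deg (PySem.List.pyGetD h deg 0 + 1)) h) j 0
      = PySem.List.pyGetD h j 0 + (List.count j l : Int) := by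
  induction l generalizing h with
  | nil => simp
  | cons deg t ih =>
      obtain ⟨hdn, hdl⟩ := hb deg (List.mem_cons_self ..)
      simp only [List.foldl_cons]
      rw [ih _ (fun x hx => by
            have hx' := hb x (List.mem_cons_of_mem _ hx)
            simpa [PySem.List.length_pySetD] using hx')]
      rw [pvGetD_setD h deg j _ hdn hdl hj]
      by_cases he : j = deg
      · subst he
        rw [List.count_cons_self]
        push_cast
        simp only [if_true]
        ring
      · have hbe : (deg == j) = false := by
          simp only [beq_eq_false_iff_ne]
          exact fun hc => he hc.symm
        simp [he, List.count_cons, hbe]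

theorem pvMain (degs : List Int) (m : Int)
    (hmax : PySem.List.max? degs (fun x => x) = some m)
    (hnn : ∀ x ∈ degs, 0 ≤ x) :
    ((PySem.List.pyRange 0 (m + 1) 1).foldl
        (fun distr grado => distr.insert grado ((PySem.List.count degs grado : Int)))
        PySem.Dict.empty).items
    = (PySem.Dict.ofList (PySem.List.enumerate (degs.foldl
        (fun h deg => PySem.List.pySetD h deg (PySem.List.pyGetD h deg 0 + 1))
        (PySem.List.pyRepeat [(0 : Int)] (m + 1))))).items := by
  have hm0 : 0 ≤ m := hnn m (PySem.List.max?_mem hmax)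
  have hle : ∀ x ∈ degs, x ≤ m := PySem.List.max?_isMax hmax
  rw [PySem.List.pyRepeat_singleton]
  set hist := degs.foldl
    (fun h deg => PySem.List.pySetD h deg (PySem.List.pyGetD h deg 0 + 1))
    (List.replicate (m + 1).toNat (0 : Int)) with hhist
  -- A side: fresh distinct keys over the range append in order
  rw [PySem.Dict.items_foldl_insert_fresh _ (fun g => g)
        (fun g => ((PySem.List.count degs g : Nat) : Int)) _
        (fun a _ => PySem.Dict.contains_empty a)
        (by simpa using PySem.List.nodup_pyRange_one 0 (m + 1))]
  -- B side: dict(enumerate(hist)) with distinct keys is enumerate(hist)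
  rw [show PySem.Dict.ofList (PySem.List.enumerate hist)
        = (PySem.List.enumerate hist).foldl (fun acc p => acc.insert p.1 p.2)
            PySem.Dict.empty from rfl]
  have hB := PySem.Dict.items_foldl_insert_fresh (PySem.List.enumerate hist)
      (fun p => p.1) (fun p => p.2) (PySem.Dict.empty : PySem.Dict Int Int)
      (fun a _ => PySem.Dict.contains_empty a.1)
      (by rw [PySem.List.map_fst_enumerate]; exact PySem.List.nodup_pyRange_one _ _)
  simp only [hB]
  -- enumerate as a map over the index range
  rw [PySem.List.enumerate_eq_map_pyRange hist 0]
  have hlen : PySem.List.len hist = m + 1 := by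
    simp only [PySem.List.len_eq, hhist, pvHist_length, List.length_replicate]
    omega
  rw [hlen]
  simp only [PySem.Dict.empty, List.nil_append, List.map_map]
  apply List.map_congr_left
  intro g hg
  obtain ⟨hg0, hgm⟩ := PySem.List.mem_pyRange_one.mp hg
  have hhg : PySem.List.pyGetD hist g 0 = (List.count g degs : Int) := by
    rw [hhist, pvHist_getD degs _ (fun x hx => by
          have h1 := hnn x hx
          have h2 := hle x hx
          constructor
          · exact h1
          · simp only [List.length_replicate]; omega) g hg0,
        pvGetD_replicate _ _ hg0]
    omega
  simp [Function.comp, hhg, PySem.List.count_eq]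

-- ===== VERDICT (by name: the statement is the Claim_ definition above) =====
theorem dist_grados_de_salida_spec : Claim_equal_dist_grados_de_salida := by
  intro d _ _
  unfold Spec_dist_grados_de_salida dist_grados_de_salida dist_grados_de_salida_alt
  simp only [pvDegs_eq]
  have hnn : ∀ x ∈ (((d.foldl (fun m p => m.insert p.1 p.2) PySem.Dict.empty).values).map
      (fun ady => (ady.length : Int))), 0 ≤ x := by
    intro x hx
    simp only [List.mem_map] at hx
    obtain ⟨a, -, rfl⟩ := hx
    positivity
  cases hmax : PySem.List.max? (((d.foldl (fun m p => m.insert p.1 p.2)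
      PySem.Dict.empty).values).map (fun ady => (ady.length : Int))) (fun x => x) with
  | none => rfl
  | some m => exact pvMain _ _ hmax hnn
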